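-- pv_equiv track=rewrite | github.com/granitelegend/Personal-109-Python-Problems-for-CCPS | cyclops_numbers.py | is_cyclops
-- ===== SOURCE A (Python) =====
-- def is_cyclops(n):
--     mark_zero, count_length, count_zero = 0, 0, 0
--     while True:
--         count_length += 1
--         if n % 10 == 0:
--             mark_zero = count_length
--             count_zero += 1
--         n //= 10
--         if not n:
--             break
--     return count_zero == 1 and mark_zero == ((count_length - 1) // 2) + 1
-- ===== SOURCE B (Python) =====
-- def is_cyclops(n):
--     s = str(n)
--     return s.count('0') == 1 and s[len(s) // 2] == '0'
-- ===== Notes on version B (the rewrite author's own statement) =====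
-- stated objective: simpler
-- what changed: Replaces A's arithmetic digit loop with its mark_zero/count_length/count_zero bookkeeping by one decimal string conversion, a count of zero characters and a direct middle-index test.
-- outside the precondition, e.g. on is_cyclops(-7): A does not finish within the time limit, B returns False
import Mathlib
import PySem

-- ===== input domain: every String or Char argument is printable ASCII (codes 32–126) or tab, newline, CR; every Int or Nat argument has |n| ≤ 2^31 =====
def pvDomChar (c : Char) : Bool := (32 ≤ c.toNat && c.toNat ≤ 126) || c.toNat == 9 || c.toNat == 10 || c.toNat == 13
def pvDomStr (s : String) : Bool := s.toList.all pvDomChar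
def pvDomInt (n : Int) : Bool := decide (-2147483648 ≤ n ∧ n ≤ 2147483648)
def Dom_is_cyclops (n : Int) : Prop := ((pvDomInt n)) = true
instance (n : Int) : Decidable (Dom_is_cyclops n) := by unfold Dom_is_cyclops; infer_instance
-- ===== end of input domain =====

-- B replaces A's arithmetic digit loop and its mark_zero/count_length bookkeeping with one decimal
-- string: count the zero characters and test the middle index directly (objective: simpler).

-- ===== PORT A =====
-- the 'while True' loop; state (count_length, mark_zero, count_zero); fuel only makes the
-- recursion total (n.natAbs + 1 steps always suffice on the n ≥ 0 inputs Pre_ admits)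
def cyclopsLoop : Nat → Int → Int → Int → Int → Int × Int × Int
  | 0, _n, cl, mz, cz => (cl, mz, cz)
  | fuel+1, n, cl, mz, cz =>
    let cl' := cl + 1
    let mz' := if PySem.Int.mod n 10 = 0 then cl' else mz
    let cz' := if PySem.Int.mod n 10 = 0 then cz + 1 else cz
    let n' := PySem.Int.floordiv n 10
    if n' = 0 then (cl', mz', cz')
    else cyclopsLoop fuel n' cl' mz' cz'

def is_cyclops (n : Int) : Bool :=
  let r := cyclopsLoop (n.natAbs + 1) n 0 0 0
  decide (r.2.2 = 1 ∧ r.2.1 = PySem.Int.floordiv (r.1 - 1) 2 + 1)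

-- ===== PORT B =====
-- s = str(n); return s.count('0') == 1 and s[len(s) // 2] == '0'
def is_cyclops_alt (n : Int) : Bool :=
  let s := PySem.Int.toStr n
  (PySem.Str.count s "0" == 1) &&
    (PySem.Str.pyGet? s (PySem.Int.floordiv (PySem.Str.len s) 2) == some '0')

-- ===== PRECONDITION & SPEC =====
-- Pre_ excludes n < 0: there A's 'while True' loop never terminates (n //= 10 stalls at -1).
def Pre_is_cyclops (n : Int) : Prop := 0 ≤ n
instance (n : Int) : Decidable (Pre_is_cyclops n) := by unfold Pre_is_cyclops; infer_instance
def pvWitness_is_cyclops : Int := (101)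

def Spec_is_cyclops (n : Int) (out : Bool) : Prop := out = is_cyclops_alt n
instance (n : Int) (out : Bool) : Decidable (Spec_is_cyclops n out) := by unfold Spec_is_cyclops; infer_instance

-- ===== CLAIM (what is proved, stated in full; the proofs are below) =====
def Claim_equal_is_cyclops : Prop := ∀ (n : Int), Dom_is_cyclops n → Pre_is_cyclops n → Spec_is_cyclops n (is_cyclops n)

-- ===== LEMMAS AND PROOFS =====

-- decimal digits of m, least significant first (never empty: zero still yields one digit)
def myDigits (m : Nat) : List Nat :=
  if m < 10 then [m] else m % 10 :: myDigits (m / 10)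
decreasing_by exact Nat.div_lt_self (by omega) (by omega)

-- what A's mark_zero is: the 1-based position (offset c) of the last 0 in ds, mz if none
def lzAux : List Nat → Int → Int → Int
  | [], _c, mz => mz
  | d :: ds, c, mz => lzAux ds (c + 1) (if d = 0 then c + 1 else mz)

lemma myDigits_ne_nil (m : Nat) : myDigits m ≠ [] := by
  rw [myDigits]; split <;> simp

lemma myDigits_lt (m : Nat) : ∀ d ∈ myDigits m, d < 10 := by
  induction m using Nat.strong_induction_on with
  | _ m ih =>
    rw [myDigits]
    split
    · intro d hd; simp at hd; omega
    · intro d hd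
      rcases List.mem_cons.1 hd with h | h
      · subst h; exact Nat.mod_lt _ (by omega)
      · exact ih (m / 10) (Nat.div_lt_self (by omega) (by omega)) d h

lemma digitChar_eq_zero_iff (d : Nat) (h : d < 10) : Nat.digitChar d = '0' ↔ d = 0 := by
  interval_cases d <;> simp [Nat.digitChar]

-- Nat.toDigits via myDigits
lemma toDigitsCore_eq : ∀ (f m : Nat) (acc : List Char), m < f →
    Nat.toDigitsCore 10 f m acc = (myDigits m).reverse.map Nat.digitChar ++ acc := by
  intro f
  induction f with
  | zero => intro m acc h; omega
  | succ f ih =>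
    intro m acc h
    rw [Nat.toDigitsCore]
    by_cases h10 : m < 10
    · rw [if_pos (by omega)]
      rw [myDigits, if_pos h10]
      simp [Nat.mod_eq_of_lt h10]
    · rw [if_neg (by omega)]
      rw [ih (m / 10) _ (by omega)]
      conv_rhs => rw [myDigits, if_neg h10]
      simp

lemma toChars_nonneg (n : Int) (h : 0 ≤ n) :
    PySem.Int.toChars n = (myDigits n.toNat).reverse.map Nat.digitChar := by
  rw [PySem.Int.toChars, if_neg (show ¬ n < 0 by omega), Nat.toDigits]
  simpa using toDigitsCore_eq (n.toNat + 1) n.toNat [] (by omega)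

-- A's loop computes length / last-zero position / zero count of the digit list
lemma cyclopsLoop_eq : ∀ (f m : Nat) (cl mz cz : Int), m < f →
    cyclopsLoop f (m : Int) cl mz cz =
      (cl + ((myDigits m).length : Int), lzAux (myDigits m) cl mz,
       cz + ((myDigits m).count 0 : Int)) := by
  intro f
  induction f with
  | zero => intro m cl mz cz h; omega
  | succ f ih =>
    intro m cl mz cz h
    rw [cyclopsLoop]
    have hmod : PySem.Int.mod (m : Int) 10 = ((m % 10 : Nat) : Int) := by
      exact_mod_cast PySem.Int.mod_natCast m 10
    have hfd : PySem.Int.floordiv (m : Int) 10 = ((m / 10 : Nat) : Int) := by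
      exact_mod_cast PySem.Int.floordiv_natCast m 10
    simp only [hmod, hfd]
    by_cases h10 : m < 10
    · rw [if_pos (by exact_mod_cast Nat.div_eq_of_lt h10)]
      conv_rhs => rw [myDigits, if_pos h10]
      simp only [Nat.mod_eq_of_lt h10, lzAux, Prod.mk.injEq, Int.natCast_eq_zero,
        List.length_cons, List.length_nil, List.count_cons, List.count_nil]
      by_cases hm0 : m = 0 <;> simp [hm0]
    · rw [if_neg (by
        intro hz
        have : m / 10 = 0 := by exact_mod_cast hz
        omega)]
      rw [ih (m / 10) _ _ _ (by omega)]
      conv_rhs => rw [myDigits, if_neg h10]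
      simp only [lzAux, List.length_cons, List.count_cons, Prod.mk.injEq, Int.natCast_eq_zero]
      refine ⟨by push_cast; ring, by trivial, ?_⟩
      by_cases hz : m % 10 = 0
      · simp [hz]; ring
      · simp [hz]

lemma lzAux_no_zero : ∀ (ds : List Nat) (c mz : Int), 0 ∉ ds → lzAux ds c mz = mz := by
  intro ds
  induction ds with
  | nil => intro c mz _; rfl
  | cons d ds ih =>
    intro c mz h
    simp at h
    rw [lzAux, if_neg (fun hd => h.1 hd.symm), ih _ _ h.2]

lemma lzAux_split : ∀ (us vs : List Nat) (c mz : Int), 0 ∉ us → 0 ∉ vs →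
    lzAux (us ++ 0 :: vs) c mz = c + (us.length : Int) + 1 := by
  intro us
  induction us with
  | nil =>
    intro vs c mz _ hv
    simp only [List.nil_append, lzAux, if_pos]
    rw [lzAux_no_zero _ _ _ hv]; simp
  | cons u us ih =>
    intro vs c mz hu hv
    simp at hu
    rw [List.cons_append, lzAux, if_neg (fun hd => hu.1 hd.symm), ih _ _ _ hu.2 hv]
    simp [List.length_cons]; omega

-- count 0 = 1 splits the list around its unique zero
lemma count_one_split : ∀ (ds : List Nat), ds.count 0 = 1 →
    ∃ us vs, ds = us ++ 0 :: vs ∧ 0 ∉ us ∧ 0 ∉ vs := by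
  intro ds
  induction ds with
  | nil => intro h; simp at h
  | cons d ds ih =>
    intro h
    by_cases hd : d = 0
    · subst hd
      have h0 : ds.count 0 = 0 := by
        rw [List.count_cons] at h; simp at h; omega
      exact ⟨[], ds, by simp, by simp, by simpa [List.count_eq_zero] using h0⟩
    · have : ds.count 0 = 1 := by
        rw [List.count_cons] at h
        simp [hd] at h; exact h
      obtain ⟨us, vs, rfl, hu, hv⟩ := ih this
      refine ⟨d :: us, vs, by simp, ?_, hv⟩
      simp only [List.mem_cons]
      rintro (hh | hh)
      · exact hd hh.symm
      · exact hu hh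

lemma go_single (c : Char) : ∀ (fuel : Nat) (cs : List Char) (acc : Nat), cs.length ≤ fuel →
    PySem.Chars.count.go [c] fuel cs acc = acc + cs.count c := by
  intro fuel
  induction fuel with
  | zero => intro cs acc h; cases cs with
    | nil => simp [PySem.Chars.count.go]
    | cons a t => simp at h
  | succ f ih => intro cs acc h; cases cs with
    | nil => simp [PySem.Chars.count.go]
    | cons a t =>
      rw [PySem.Chars.count.go]
      by_cases hc : a = c
      · simp [hc, List.isPrefixOf]
        rw [ih t (acc+1) (by simpa using h)]
        omega
      · rw [if_neg (by simp [List.isPrefixOf]; intro h'; exact absurd h'.symm hc)]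
        rw [ih t acc (by simpa using h)]
        simp [hc]

lemma count_single (cs : List Char) (c : Char) : PySem.Chars.count cs [c] = cs.count c := by
  rw [PySem.Chars.count]
  simp [go_single c cs.length cs 0 le_rfl]

-- counting '0' chars among digits < 10 counts the 0 digits
lemma count_digitChar (ds : List Nat) (h : ∀ d ∈ ds, d < 10) :
    (ds.map Nat.digitChar).count '0' = ds.count 0 := by
  induction ds with
  | nil => rfl
  | cons d ds ih =>
    simp only [List.map_cons, List.count_cons]
    rw [ih (fun x hx => h x (List.mem_cons_of_mem _ hx))]
    have := digitChar_eq_zero_iff d (h d (List.mem_cons_self ..))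
    by_cases hd : d = 0 <;> simp_all


-- in us ++ 0 :: vs with no other zeros, index i holds 0 exactly at i = us.length
lemma zero_at_iff (ds us vs : List Nat) (h : ds = us ++ 0 :: vs) (hu : 0 ∉ us) (hv : 0 ∉ vs)
    (i : Nat) (hi : i < ds.length) : ds[i] = 0 ↔ i = us.length := by
  subst h
  rcases lt_trichotomy i us.length with hlt | heq | hgt
  · rw [List.getElem_append_left hlt]
    constructor
    · intro h0; exact absurd (h0 ▸ List.getElem_mem hlt) hu
    · omega
  · subst heq
    rw [List.getElem_append_right le_rfl]
    simp
  · rw [List.getElem_append_right (by omega)]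
    have hk : i - us.length = (i - us.length - 1) + 1 := by omega
    constructor
    · intro h0
      obtain ⟨k, hk2⟩ : ∃ k, i - us.length = k + 1 := ⟨i - us.length - 1, by omega⟩
      simp only [hk2] at h0
      rw [List.getElem_cons_succ] at h0
      exact absurd (h0 ▸ List.getElem_mem _) hv
    · omega

-- ===== VERDICT (by name: the statement is the Claim_ definition above) =====
theorem is_cyclops_spec : Claim_equal_is_cyclops := by
  intro n _hdom hpre
  unfold Spec_is_cyclops
  have hn : ((n.toNat : Int)) = n := Int.toNat_of_nonneg hpre
  set m := n.toNat with hm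
  set ds := myDigits m with hds
  have hlt : ∀ d ∈ ds, d < 10 := myDigits_lt m
  have hne : ds ≠ [] := myDigits_ne_nil m
  have hL : 1 ≤ ds.length := by
    cases hcc : ds with
    | nil => exact absurd hcc hne
    | cons a t => simp
  -- A's value
  have hfuel : m < n.natAbs + 1 := by omega
  have hA : is_cyclops n =
      decide ((ds.count 0 : Int) = 1 ∧ lzAux ds 0 0 = PySem.Int.floordiv ((ds.length : Int) - 1) 2 + 1) := by
    rw [is_cyclops]
    rw [← hn]
    rw [cyclopsLoop_eq ((m:Int).natAbs + 1) m 0 0 0 (by simp)]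
    simp only [← hds]
    norm_num
  -- B's value
  have hcs : (PySem.Int.toStr n).toList = ds.reverse.map Nat.digitChar := by
    rw [PySem.Int.toStr]
    rw [String.toList_ofList]
    exact toChars_nonneg n hpre
  have hcount : PySem.Str.count (PySem.Int.toStr n) "0" = ds.count 0 := by
    rw [PySem.Str.count_eq, hcs]
    have h0 : "0".toList = ['0'] := rfl
    rw [h0, count_single, count_digitChar ds.reverse (by
      intro d hd; exact hlt d (List.mem_reverse.1 hd)), List.count_reverse]
  have hlen : PySem.Str.len (PySem.Int.toStr n) = (ds.length : Int) := by
    rw [PySem.Str.len_eq, hcs]; simp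
  have hget : PySem.Str.pyGet? (PySem.Int.toStr n)
      (PySem.Int.floordiv (PySem.Str.len (PySem.Int.toStr n)) 2)
      = some (Nat.digitChar (ds[(ds.length - 1) / 2]'(by omega))) := by
    rw [hlen]
    have hfd : PySem.Int.floordiv (ds.length : Int) 2 = ((ds.length / 2 : Nat) : Int) := by
      exact_mod_cast PySem.Int.floordiv_natCast ds.length 2
    rw [hfd, PySem.Str.pyGet?_natCast, hcs, List.getElem?_map]
    have hrev : ds.reverse[ds.length / 2]? = some ((ds[(ds.length - 1) / 2]'(by omega))) := by
      rw [List.getElem?_reverse (by omega)]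
      rw [List.getElem?_eq_getElem (by omega)]
      simp only [show ds.length - 1 - ds.length / 2 = (ds.length - 1) / 2 from by omega]
    rw [hrev]
    rfl
  rw [hA]
  simp only [is_cyclops_alt]
  rw [hcount, hget]
  have hfd2 : PySem.Int.floordiv ((ds.length : Int) - 1) 2 = (((ds.length - 1) / 2 : Nat) : Int) := by
    have h1 : ((ds.length : Int) - 1) = ((ds.length - 1 : Nat) : Int) := by omega
    rw [h1]; exact_mod_cast PySem.Int.floordiv_natCast (ds.length - 1) 2
  rw [hfd2, Bool.eq_iff_iff]
  simp only [decide_eq_true_iff, Bool.and_eq_true, beq_iff_eq, Option.some_inj]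
  constructor
  · rintro ⟨hc1, hlzeq⟩
    have hc : ds.count 0 = 1 := by exact_mod_cast hc1
    obtain ⟨us, vs, hsplit, hu, hv⟩ := count_one_split ds hc
    rw [hsplit, lzAux_split us vs 0 0 hu hv] at hlzeq
    have hL2 : ds.length = us.length + 1 + vs.length := by simp [hsplit]; omega
    simp only [List.length_append, List.length_cons] at hlzeq
    have hul : (ds.length - 1) / 2 = us.length := by omega
    refine ⟨hc, ?_⟩
    have h0 : (ds[(ds.length - 1) / 2]'(by omega)) = 0 :=
      (zero_at_iff ds us vs hsplit hu hv _ (by omega)).2 hul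
    rw [h0]
    rfl
  · rintro ⟨hc, hdig⟩
    obtain ⟨us, vs, hsplit, hu, hv⟩ := count_one_split ds hc
    have h0 : (ds[(ds.length - 1) / 2]'(by omega)) = 0 := by
      have hd10 : (ds[(ds.length - 1) / 2]'(by omega)) < 10 :=
        hlt _ (List.getElem_mem _)
      exact (digitChar_eq_zero_iff _ hd10).1 hdig
    have hul : (ds.length - 1) / 2 = us.length :=
      (zero_at_iff ds us vs hsplit hu hv _ (by omega)).1 h0
    have hL2 : ds.length = us.length + 1 + vs.length := by simp [hsplit]; omega
    refine ⟨by exact_mod_cast hc, ?_⟩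
    rw [hsplit, lzAux_split us vs 0 0 hu hv]
    simp only [List.length_append, List.length_cons]
    omega
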